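-- pv_equiv track=rewrite | github.com/dbbuilder/VibePruner | ui.py | _group_proposals
-- ===== SOURCE A (Python) =====
-- def _group_proposals(proposals):
--     """Group proposals by action type"""
--     grouped = {
--         'delete': [],
--         'archive': [],
--         'consolidate': []
--     }
--
--     for proposal in proposals:
--         action = proposal.get('action', 'archive')
--         if action in grouped:
--             grouped[action].append(proposal)
--
--     return grouped
-- ===== SOURCE B (Python) =====
-- def _group_proposals(proposals):
--     """Group proposals by action type"""
--     proposals = list(proposals)
--
--     def act(p):
--         return p.get('action', 'archive')
--
--     return {
--         'delete': [p for p in proposals if act(p) == 'delete'],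
--         'archive': [p for p in proposals if act(p) == 'archive'],
--         'consolidate': [p for p in proposals if act(p) == 'consolidate'],
--     }
-- ===== Notes on version B (the rewrite author's own statement) =====
-- stated objective: simpler
-- what changed: Replaces the mutable dict with dispatch-on-key appends by building the result directly: one independent filtering comprehension per bucket over a materialized list, with the same default-'archive' rule.
import Mathlib
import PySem

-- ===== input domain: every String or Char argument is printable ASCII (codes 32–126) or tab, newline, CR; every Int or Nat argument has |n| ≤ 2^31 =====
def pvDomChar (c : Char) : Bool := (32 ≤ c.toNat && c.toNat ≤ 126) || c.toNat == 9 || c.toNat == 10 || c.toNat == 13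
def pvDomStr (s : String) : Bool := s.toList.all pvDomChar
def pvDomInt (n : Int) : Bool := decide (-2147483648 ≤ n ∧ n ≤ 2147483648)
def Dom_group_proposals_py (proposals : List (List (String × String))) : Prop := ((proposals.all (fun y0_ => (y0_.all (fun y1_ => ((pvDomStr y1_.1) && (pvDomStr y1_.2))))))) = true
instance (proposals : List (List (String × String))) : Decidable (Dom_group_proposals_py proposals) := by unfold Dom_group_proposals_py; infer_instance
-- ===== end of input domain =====

-- B builds the grouped dict directly, one filter comprehension per bucket, instead of A's dispatch-on-key append loop.


-- ===== PORT A =====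
def group_proposals_py (proposals : List (List (String × String))) : List (String × List (List (String × String))) :=
  let grouped : PySem.Dict String (List (List (String × String))) :=
    PySem.Dict.ofList [("delete", []), ("archive", []), ("consolidate", [])]
  let grouped := proposals.foldl (fun grouped proposal =>
    let action := (PySem.Dict.mk proposal).getD "action" "archive"
    if grouped.contains action then grouped.modify action [] (· ++ [proposal]) else grouped) grouped
  grouped.items

-- ===== PORT B =====
def pvActOf (p : List (String × String)) : String := (PySem.Dict.mk p).getD "action" "archive"

def group_proposals_py_alt (proposals : List (List (String × String))) : List (String × List (List (String × String))) :=
  [("delete", proposals.filter (fun p => pvActOf p == "delete")),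
   ("archive", proposals.filter (fun p => pvActOf p == "archive")),
   ("consolidate", proposals.filter (fun p => pvActOf p == "consolidate"))]

-- ===== PRECONDITION & SPEC =====
def Spec_group_proposals_py (proposals : List (List (String × String))) (out : List (String × List (List (String × String)))) : Prop := out = group_proposals_py_alt proposals
instance (proposals : List (List (String × String))) (out : List (String × List (List (String × String)))) : Decidable (Spec_group_proposals_py proposals out) := by unfold Spec_group_proposals_py; infer_instance

-- ===== CLAIM (what is proved, stated in full; the proofs are below) =====
def Claim_equal_group_proposals_py : Prop := ∀ (proposals : List (List (String × String))), Dom_group_proposals_py proposals → Spec_group_proposals_py proposals (group_proposals_py proposals)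

-- ===== LEMMAS AND PROOFS =====
lemma group_step (d a c : List (List (String × String))) (s : String)
    (pp : List (String × String)) :
    (if (PySem.Dict.mk [("delete", d), ("archive", a), ("consolidate", c)]).contains s
     then (PySem.Dict.mk [("delete", d), ("archive", a), ("consolidate", c)]).modify s [] (· ++ [pp])
     else PySem.Dict.mk [("delete", d), ("archive", a), ("consolidate", c)]) =
    PySem.Dict.mk [("delete", if s = "delete" then d ++ [pp] else d),
                   ("archive", if s = "archive" then a ++ [pp] else a),
                   ("consolidate", if s = "consolidate" then c ++ [pp] else c)] := by
  by_cases h1 : s = "delete"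
  · simp [h1, PySem.Dict.contains, PySem.Dict.modify, PySem.Dict.getD, PySem.Dict.get?,
      PySem.Dict.insert]
  · by_cases h2 : s = "archive"
    · simp [h2, PySem.Dict.contains, PySem.Dict.modify, PySem.Dict.getD, PySem.Dict.get?,
        PySem.Dict.insert]
    · by_cases h3 : s = "consolidate"
      · simp [h3, PySem.Dict.contains, PySem.Dict.modify, PySem.Dict.getD, PySem.Dict.get?,
          PySem.Dict.insert]
      · simp only [PySem.Dict.contains, List.any_cons, List.any_nil, Bool.or_false,
          beq_iff_eq, Bool.or_eq_true, Ne.symm h1, Ne.symm h2,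
          Ne.symm h3, or_self, if_false]
        simp [h1, h2, h3]

lemma group_inv (ps : List (List (String × String)))
    (d a c : List (List (String × String))) :
    (ps.foldl (fun grouped proposal =>
        let action := (PySem.Dict.mk proposal).getD "action" "archive"
        if grouped.contains action then grouped.modify action [] (· ++ [proposal]) else grouped)
      (PySem.Dict.mk [("delete", d), ("archive", a), ("consolidate", c)])).items =
    [("delete", d ++ ps.filter (fun p => pvActOf p == "delete")),
     ("archive", a ++ ps.filter (fun p => pvActOf p == "archive")),
     ("consolidate", c ++ ps.filter (fun p => pvActOf p == "consolidate"))] := by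
  induction ps generalizing d a c with
  | nil => simp
  | cons p ps ih =>
    simp only [List.foldl_cons, group_step]
    rw [ih]
    simp only [List.filter_cons, pvActOf]
    by_cases h1 : (PySem.Dict.mk p).getD "action" "archive" = "delete"
    · simp [h1]
    · by_cases h2 : (PySem.Dict.mk p).getD "action" "archive" = "archive"
      · simp [h2]
      · by_cases h3 : (PySem.Dict.mk p).getD "action" "archive" = "consolidate"
        · simp [h3]
        · simp [h1, h2, h3]

-- ===== VERDICT (by name: the statement is the Claim_ definition above) =====
theorem group_proposals_py_spec : Claim_equal_group_proposals_py := by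
  intro proposals _
  unfold Spec_group_proposals_py group_proposals_py group_proposals_py_alt
  simpa [PySem.Dict.ofList] using group_inv proposals [] [] []
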